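-- pv_equiv track=rewrite | github.com/mose09/convert | oracle_embeddings/legacy_react_router.py | collect_menu_scope_files
-- ===== SOURCE A (Python) =====
-- def collect_menu_scope_files(menu_url_norm: str, url_map: dict,
--                               import_graph: dict[str, set[str]],
--                               max_depth: int = 8) -> set[str]:
--     """Return absolute files reachable from ``menu_url_norm`` via imports.
--
--     Seeds = ``url_map[menu_url_norm].declared_in`` + ``file_path``.
--     BFS forward up to ``max_depth`` hops, cycle-safe. Empty set if the
--     URL is not in ``url_map`` (caller can treat as "no Route match").
--     """
--     if not menu_url_norm:
--         return set()
--     entry = url_map.get(menu_url_norm)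
--     if not entry:
--         return set()
--     seeds: list[str] = []
--     for key in ("declared_in", "file_path"):
--         p = entry.get(key) or ""
--         if p and p not in seeds:
--             seeds.append(p)
--     if not seeds:
--         return set()
--     visited: set[str] = set(seeds)
--     frontier = list(seeds)
--     for _ in range(max_depth):
--         next_frontier: list[str] = []
--         for f in frontier:
--             for dep in import_graph.get(f, ()):
--                 if dep not in visited:
--                     visited.add(dep)
--                     next_frontier.append(dep)
--         if not next_frontier:
--             break
--         frontier = next_frontier
--     return visited
-- ===== SOURCE B (Python) =====
-- def collect_menu_scope_files(menu_url_norm: str, url_map: dict,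
--                               import_graph: "dict[str, set[str]]",
--                               max_depth: int = 8) -> "set[str]":
--     """Naive fixed-point closure: instead of maintaining a BFS frontier, each
--     round rescans the ENTIRE visited list and appends any unseen dependency,
--     stopping when a round adds nothing (or after max_depth rounds)."""
--     if not menu_url_norm:
--         return set()
--     entry = url_map.get(menu_url_norm)
--     if not entry:
--         return set()
--     di = entry.get("declared_in") or ""
--     fp = entry.get("file_path") or ""
--     visited = [s for s in dict.fromkeys((di, fp)) if s]
--     if not visited:
--         return set()
--     for _ in range(max_depth):
--         size = len(visited)
--         for f in visited[:size]:
--             for dep in import_graph.get(f, ()):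
--                 if dep not in visited:
--                     visited.append(dep)
--         if len(visited) == size:
--             break
--     return set(visited)
-- ===== Notes on version B (the rewrite author's own statement) =====
-- stated objective: alternative
-- what changed: Replaces the frontier-driven BFS (visited set + next_frontier rebuilt each level) by a naive fixed-point closure: each round rescans the entire visited list and appends any unseen dependency, stopping when a round adds nothing or after max_depth rounds; seeds come from an ordered dedup (dict.fromkeys) instead of a keyed append loop.
import Mathlib
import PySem

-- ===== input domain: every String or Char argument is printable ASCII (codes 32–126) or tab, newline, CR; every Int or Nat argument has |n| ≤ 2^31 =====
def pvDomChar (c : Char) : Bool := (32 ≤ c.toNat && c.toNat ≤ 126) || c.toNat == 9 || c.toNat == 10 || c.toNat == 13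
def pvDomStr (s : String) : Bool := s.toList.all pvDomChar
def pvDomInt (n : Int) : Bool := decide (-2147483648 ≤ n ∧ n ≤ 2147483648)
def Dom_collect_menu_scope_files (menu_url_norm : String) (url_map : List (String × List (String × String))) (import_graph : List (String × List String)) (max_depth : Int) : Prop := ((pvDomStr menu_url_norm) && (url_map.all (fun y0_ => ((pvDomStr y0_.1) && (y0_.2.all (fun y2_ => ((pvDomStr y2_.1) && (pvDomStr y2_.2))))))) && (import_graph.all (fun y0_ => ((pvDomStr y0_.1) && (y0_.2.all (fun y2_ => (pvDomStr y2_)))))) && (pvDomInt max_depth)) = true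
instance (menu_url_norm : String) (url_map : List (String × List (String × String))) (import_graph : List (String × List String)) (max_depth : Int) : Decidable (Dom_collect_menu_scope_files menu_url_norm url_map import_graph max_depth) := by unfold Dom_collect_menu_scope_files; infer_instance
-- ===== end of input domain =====

-- Header: B replaces the frontier-driven BFS by a naive fixed-point closure —
-- each round rescans the ENTIRE visited list and appends unseen dependencies,
-- stopping when a round adds nothing (or after max_depth rounds); objective:
-- alternative (not faster). Both ports return the set's insertion-order list.

-- ===== PORT A =====

-- import_graph.get(f, ())
def pvDeps (g : List (String × List String)) (f : String) : List String :=
  (PySem.Dict.mk g).getD f []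

-- inner body: if dep not in visited: visited.add(dep); next_frontier.append(dep)
def pvAStep (st : List String × List String) (dep : String) : List String × List String :=
  if dep ∈ st.1 then st else (PySem.Set.add st.1 dep, st.2 ++ [dep])

-- for _ in range(max_depth): … (k = remaining iterations)
def pvALoop (g : List (String × List String)) : Nat → List String → List String → List String
  | 0, visited, _ => visited
  | Nat.succ k, visited, frontier =>
    let st := frontier.foldl (fun st f => (pvDeps g f).foldl pvAStep st) (visited, [])
    if st.2 = [] then st.1 else pvALoop g k st.1 st.2

-- seeds: for key in ("declared_in", "file_path"): p = entry.get(key) or ""; append if new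
def pvASeeds (entry : List (String × String)) : List String :=
  ["declared_in", "file_path"].foldl (fun seeds key =>
    let p := ((PySem.Dict.mk entry).get? key).getD ""
    if p ≠ "" ∧ p ∉ seeds then seeds ++ [p] else seeds) []

def collect_menu_scope_files (menu_url_norm : String) (url_map : List (String × List (String × String))) (import_graph : List (String × List String)) (max_depth : Int) : List String :=
  if menu_url_norm = "" then []
  else match (PySem.Dict.mk url_map).get? menu_url_norm with
  | none => []
  | some entry =>
    if entry = [] then []
    else if pvASeeds entry = [] then []
    else pvALoop import_graph max_depth.toNat (PySem.Set.ofList (pvASeeds entry)) (pvASeeds entry)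

-- ===== PORT B =====

-- if dep not in visited: visited.append(dep)   (membership on the plain list)
def pvBStep (acc : List String) (dep : String) : List String :=
  if dep ∈ acc then acc else acc ++ [dep]

-- one round: for f in visited[:size]: for dep in import_graph.get(f, ()): …
-- (the snapshot visited[:size] is the round's starting list, folded while the
--  accumulator grows)
def pvBRound (g : List (String × List String)) (v : List String) : List String :=
  v.foldl (fun acc f => (pvDeps g f).foldl pvBStep acc) v

-- for _ in range(max_depth): round; break when the length did not change
def pvBLoop (g : List (String × List String)) : Nat → List String → List String
  | 0, v => v
  | Nat.succ k, v =>
    let v' := pvBRound g v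
    if v'.length = v.length then v' else pvBLoop g k v'

-- visited = [s for s in dict.fromkeys((di, fp)) if s]
def pvBSeeds (entry : List (String × String)) : List String :=
  let di := ((PySem.Dict.mk entry).get? "declared_in").getD ""
  let fp := ((PySem.Dict.mk entry).get? "file_path").getD ""
  (PySem.List.dedup [di, fp]).filter (fun s => s ≠ "")

def collect_menu_scope_files_alt (menu_url_norm : String) (url_map : List (String × List (String × String))) (import_graph : List (String × List String)) (max_depth : Int) : List String :=
  if menu_url_norm = "" then []
  else match (PySem.Dict.mk url_map).get? menu_url_norm with
  | none => []
  | some entry =>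
    if entry = [] then []
    else if pvBSeeds entry = [] then []
    else PySem.Set.ofList (pvBLoop import_graph max_depth.toNat (pvBSeeds entry))

-- ===== PRECONDITION & SPEC =====
def Spec_collect_menu_scope_files (menu_url_norm : String) (url_map : List (String × List (String × String))) (import_graph : List (String × List String)) (max_depth : Int) (out : List String) : Prop := out = collect_menu_scope_files_alt menu_url_norm url_map import_graph max_depth
instance (menu_url_norm : String) (url_map : List (String × List (String × String))) (import_graph : List (String × List String)) (max_depth : Int) (out : List String) : Decidable (Spec_collect_menu_scope_files menu_url_norm url_map import_graph max_depth out) := by unfold Spec_collect_menu_scope_files; infer_instance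

-- ===== CLAIM (what is proved, stated in full; the proofs are below) =====
def Claim_equal_collect_menu_scope_files : Prop := ∀ (menu_url_norm : String) (url_map : List (String × List (String × String))) (import_graph : List (String × List String)) (max_depth : Int), Dom_collect_menu_scope_files menu_url_norm url_map import_graph max_depth → Spec_collect_menu_scope_files menu_url_norm url_map import_graph max_depth (collect_menu_scope_files menu_url_norm url_map import_graph max_depth)

-- ===== LEMMAS AND PROOFS =====

lemma pvSetAdd_not_mem {s : List String} {x : String} (h : x ∉ s) :
    PySem.Set.add s x = s ++ [x] := by
  simp [PySem.Set.add, PySem.Set.contains, h]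

-- the sublist of deps that are new w.r.t. visited (in discovery order)
def pvNewDeps (visited : List String) : List String → List String
  | [] => []
  | dep :: ds => if dep ∈ visited then pvNewDeps visited ds else dep :: pvNewDeps (visited ++ [dep]) ds

-- all new nodes discovered while scanning the files fr against visited
def pvLevelNew (g : List (String × List String)) (visited : List String) : List String → List String
  | [] => []
  | f :: fr =>
    let n := pvNewDeps visited (pvDeps g f)
    n ++ pvLevelNew g (visited ++ n) fr

lemma pvAStep_fold (deps : List String) : ∀ (v nf : List String),
    deps.foldl pvAStep (v, nf) = (v ++ pvNewDeps v deps, nf ++ pvNewDeps v deps) := by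
  induction deps with
  | nil => intro v nf; simp [pvNewDeps]
  | cons dep ds ih =>
    intro v nf
    by_cases hv : dep ∈ v
    · simp [pvNewDeps, pvAStep, hv, ih]
    · simp only [List.foldl_cons, pvAStep, hv, if_neg, pvSetAdd_not_mem hv, pvNewDeps, not_false_iff]
      rw [ih]
      simp

lemma pvALevel_fold (g : List (String × List String)) (fr : List String) : ∀ (v nf : List String),
    fr.foldl (fun st f => (pvDeps g f).foldl pvAStep st) (v, nf)
      = (v ++ pvLevelNew g v fr, nf ++ pvLevelNew g v fr) := by
  induction fr with
  | nil => intro v nf; simp [pvLevelNew]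
  | cons f fr ih =>
    intro v nf
    simp only [List.foldl_cons, pvAStep_fold, pvLevelNew]
    rw [ih]
    simp

lemma pvBStep_fold (deps : List String) : ∀ (acc : List String),
    deps.foldl pvBStep acc = acc ++ pvNewDeps acc deps := by
  induction deps with
  | nil => intro acc; simp [pvNewDeps]
  | cons dep ds ih =>
    intro acc
    by_cases hv : dep ∈ acc
    · simp [pvNewDeps, pvBStep, hv, ih]
    · simp only [List.foldl_cons, pvBStep, hv, if_neg, pvNewDeps, not_false_iff]
      rw [ih]
      simp

lemma pvBScan_fold (g : List (String × List String)) (fr : List String) : ∀ (acc : List String),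
    fr.foldl (fun acc f => (pvDeps g f).foldl pvBStep acc) acc = acc ++ pvLevelNew g acc fr := by
  induction fr with
  | nil => intro acc; simp [pvLevelNew]
  | cons f fr ih =>
    intro acc
    rw [List.foldl_cons, pvBStep_fold, ih, pvLevelNew]
    simp [List.append_assoc]

lemma pvNewDeps_nil_of_subset {deps v : List String} (h : ∀ x ∈ deps, x ∈ v) :
    pvNewDeps v deps = [] := by
  induction deps with
  | nil => rfl
  | cons dep ds ih =>
    rw [pvNewDeps, if_pos (h dep (List.mem_cons_self))]
    exact ih (fun x hx => h x (List.mem_cons_of_mem _ hx))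

lemma pvLevelNew_nil_of_closed (g : List (String × List String)) {p v : List String}
    (h : ∀ f ∈ p, ∀ x ∈ pvDeps g f, x ∈ v) : pvLevelNew g v p = [] := by
  induction p with
  | nil => rfl
  | cons f fr ih =>
    rw [pvLevelNew]
    have hn : pvNewDeps v (pvDeps g f) = [] :=
      pvNewDeps_nil_of_subset (h f (List.mem_cons_self))
    simp only [hn, List.nil_append, List.append_nil]
    exact ih (fun f' hf' => h f' (List.mem_cons_of_mem _ hf'))

lemma pvLevelNew_append (g : List (String × List String)) (a : List String) :
    ∀ (v b : List String),
    pvLevelNew g v (a ++ b) = pvLevelNew g v a ++ pvLevelNew g (v ++ pvLevelNew g v a) b := by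
  induction a with
  | nil => intro v b; simp [pvLevelNew]
  | cons f fr ih =>
    intro v b
    simp only [List.cons_append, pvLevelNew]
    rw [ih]
    simp [List.append_assoc]

lemma pvNewDeps_cover {x : String} (deps : List String) : ∀ (v : List String),
    x ∈ deps → x ∈ v ++ pvNewDeps v deps := by
  induction deps with
  | nil => intro v h; cases h
  | cons dep ds ih =>
    intro v hx
    by_cases hv : dep ∈ v
    · rw [pvNewDeps, if_pos hv]
      rcases List.mem_cons.mp hx with rfl | hx'
      · exact List.mem_append_left _ hv
      · exact ih v hx'
    · rw [pvNewDeps, if_neg hv]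
      rcases List.mem_cons.mp hx with rfl | hx'
      · simp
      · have := ih (v ++ [dep]) hx'
        simpa [List.append_assoc] using this
lemma pvLevelNew_cover (g : List (String × List String)) {x f : String} (fr : List String) :
    ∀ (v : List String), f ∈ fr → x ∈ pvDeps g f → x ∈ v ++ pvLevelNew g v fr := by
  induction fr with
  | nil => intro v h; cases h
  | cons f' fr ih =>
    intro v hf hx
    rw [pvLevelNew]
    rcases List.mem_cons.mp hf with rfl | hf'
    · have := pvNewDeps_cover (pvDeps g f) v hx
      simp only [List.mem_append] at this ⊢
      tauto
    · have := ih (v ++ pvNewDeps v (pvDeps g f')) hf' hx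
      simp only [List.mem_append] at this ⊢
      tauto

lemma pvBStep_nodup (deps : List String) : ∀ {acc : List String}, acc.Nodup →
    (deps.foldl pvBStep acc).Nodup := by
  induction deps with
  | nil => intro acc h; exact h
  | cons dep ds ih =>
    intro acc h
    by_cases hv : dep ∈ acc
    · simpa [pvBStep, hv] using ih h
    · simp only [List.foldl_cons, pvBStep, hv, if_neg, not_false_iff]
      refine ih ?_
      simp [List.nodup_append, h]
      intro a ha hEq
      exact hv (hEq ▸ ha)

lemma pvBRound_nodup (g : List (String × List String)) (fr : List String) :
    ∀ {acc : List String}, acc.Nodup →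
    (fr.foldl (fun acc f => (pvDeps g f).foldl pvBStep acc) acc).Nodup := by
  induction fr with
  | nil => intro acc h; exact h
  | cons f fr ih =>
    intro acc h
    exact ih (pvBStep_nodup _ h)

lemma pvBLoop_nodup (g : List (String × List String)) : ∀ (k : Nat) {v : List String},
    v.Nodup → (pvBLoop g k v).Nodup := by
  intro k
  induction k with
  | zero => intro v h; exact h
  | succ k ih =>
    intro v h
    rw [pvBLoop]
    split
    · exact pvBRound_nodup g v h
    · exact ih (pvBRound_nodup g v h)

-- A's frontier loop equals B's whole-list rescan loop, under the invariant that
-- the visited list is (already-expanded prefix) ++ frontier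
lemma pvLoops_eq (g : List (String × List String)) : ∀ (k : Nat) (p v fr : List String),
    v = p ++ fr → (∀ f ∈ p, ∀ x ∈ pvDeps g f, x ∈ v) →
    pvALoop g k v fr = pvBLoop g k v := by
  intro k
  induction k with
  | zero => intro p v fr _ _; rfl
  | succ k ih =>
    intro p v fr hv hp
    have hLv : pvLevelNew g v v = pvLevelNew g v fr := by
      rw [hv, pvLevelNew_append, pvLevelNew_nil_of_closed g (by rw [← hv]; exact hp)]
      simp
    have hround : pvBRound g v = v ++ pvLevelNew g v fr := by
      rw [pvBRound, pvBScan_fold, hLv]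
    rw [pvALoop, pvBLoop]
    simp only [pvALevel_fold, List.nil_append, hround]
    by_cases hn : pvLevelNew g v fr = []
    · simp [hn]
    · have hlen : ¬ (v ++ pvLevelNew g v fr).length = v.length := by
        simp only [List.length_append]
        have : 0 < (pvLevelNew g v fr).length := List.length_pos_of_ne_nil hn
        omega
      rw [if_neg hn, if_neg hlen]
      refine ih v (v ++ pvLevelNew g v fr) (pvLevelNew g v fr) rfl ?_
      intro f hf x hx
      rcases (by rw [hv] at hf; exact List.mem_append.mp hf) with hf' | hf'
      · exact List.mem_append_left _ (hp f hf' x hx)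
      · exact pvLevelNew_cover g fr v hf' hx

lemma pvSeeds_eq (entry : List (String × String)) : pvASeeds entry = pvBSeeds entry := by
  unfold pvASeeds pvBSeeds
  set di := ((PySem.Dict.mk entry).get? "declared_in").getD "" with hdi
  set fp := ((PySem.Dict.mk entry).get? "file_path").getD "" with hfp
  simp only [List.foldl_cons, List.foldl_nil, PySem.List.dedup]
  by_cases h1 : di = "" <;> by_cases h2 : fp = "" <;> by_cases h3 : fp = di <;>
    simp_all [PySem.Set.ofList, PySem.Set.add, PySem.Set.contains,
      List.filter]

lemma pvBSeeds_nodup (entry : List (String × String)) : (pvBSeeds entry).Nodup := by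
  unfold pvBSeeds
  exact (PySem.List.nodup_dedup _).filter _

-- ===== VERDICT (by name: the statement is the Claim_ definition above) =====
theorem collect_menu_scope_files_spec : Claim_equal_collect_menu_scope_files := by
  intro menu_url_norm url_map import_graph max_depth _
  unfold Spec_collect_menu_scope_files collect_menu_scope_files collect_menu_scope_files_alt
  by_cases h0 : menu_url_norm = ""
  · simp [h0]
  rw [if_neg h0, if_neg h0]
  cases hget : (PySem.Dict.mk url_map).get? menu_url_norm with
  | none => rfl
  | some entry =>
    dsimp only
    by_cases he : entry = []
    · simp [he]
    rw [if_neg he, if_neg he, pvSeeds_eq]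
    by_cases hs : pvBSeeds entry = []
    · rw [if_pos hs, if_pos hs]
    · rw [if_neg hs, if_neg hs,
        PySem.Set.ofList_eq_self_of_nodup _ (pvBSeeds_nodup entry),
        pvLoops_eq import_graph max_depth.toNat [] (pvBSeeds entry) (pvBSeeds entry) rfl
          (by intro f hf; cases hf),
        PySem.Set.ofList_eq_self_of_nodup _
          (pvBLoop_nodup import_graph max_depth.toNat (pvBSeeds_nodup entry))]
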